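-- pv_equiv track=rewrite | github.com/AndresAp01/Taller_de_Programacion | Examenes_Intro/test.py | UNO_aux
-- ===== SOURCE A (Python) =====
-- def UNO_aux(num1, num2, largo, indice_actual):
--     if indice_actual >= largo:
--         return []
--     cantidad_pares   = (largo + 1) // 2
--     cantidad_impares = largo // 2
--     odd_max  = largo - 2 + ((largo - 1) % 2)
--     even_max = largo - 2 + (1 - ((largo - 1) % 2))
--     posicion_primer = (
--         2 * indice_actual
--         if indice_actual < cantidad_pares
--         else odd_max - 2 * (indice_actual - cantidad_pares)
--     )
--     posicion_segundo = (
--         2 * indice_actual + 1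
--         if indice_actual < cantidad_impares
--         else even_max - 2 * (indice_actual - cantidad_impares)
--     )
--
--     dig1_encontrado = (num1 // (10 ** (largo - 1 - posicion_primer))) % 10
--     dig2_encontrado = (num2 // (10 ** (largo - 1 - posicion_segundo))) % 10
--     sucesor1, antecesor1 = dig1_encontrado + 1, dig1_encontrado - 1
--     sucesor2, antecesor2 = dig2_encontrado + 1, dig2_encontrado - 1
--
--     digito_primer = [1, 0, 1,sucesor1,dig1_encontrado,sucesor1 + dig1_encontrado - antecesor1,antecesor1, -1, 0, -1]
--     digito_segundo = [-2, 0, -2,sucesor2,dig2_encontrado,sucesor2 + dig2_encontrado - antecesor2,antecesor2, 2, 0, 2]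
--     return [digito_primer, digito_segundo] + UNO_aux(num1, num2, largo, indice_actual + 1)
-- ===== SOURCE B (Python) =====
-- def UNO_aux(num1, num2, largo, indice_actual):
--     cp, ci = (largo + 1) // 2, largo // 2
--     r = (largo - 1) % 2
--
--     def dig(num, p):
--         return (num // 10 ** (largo - 1 - p)) % 10
--
--     def pos(i, cnt, mx, off):
--         return 2 * i + off if i < cnt else mx - 2 * (i - cnt)
--
--     def row(t, d):
--         return [t, 0, t, d + 1, d, d + 2, d - 1, -t, 0, -t]
--
--     return [row(t, dig(num, pos(i, cnt, mx, off)))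
--             for i in range(indice_actual, largo)
--             for (t, num, cnt, mx, off) in ((1, num1, cp, largo - 2 + r, 0),
--                                            (-2, num2, ci, largo - 1 - r, 1))]
-- ===== Notes on version B (the rewrite author's own statement) =====
-- stated objective: alternative
-- what changed: Replaces A's non-tail recursion that rebuilds constants and concatenates at every level with a flat comprehension (flatMap) over range(indice_actual, largo) crossed with a two-tuple spec table, factoring digit extraction, position selection and row construction into shared helpers.
import Mathlib
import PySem

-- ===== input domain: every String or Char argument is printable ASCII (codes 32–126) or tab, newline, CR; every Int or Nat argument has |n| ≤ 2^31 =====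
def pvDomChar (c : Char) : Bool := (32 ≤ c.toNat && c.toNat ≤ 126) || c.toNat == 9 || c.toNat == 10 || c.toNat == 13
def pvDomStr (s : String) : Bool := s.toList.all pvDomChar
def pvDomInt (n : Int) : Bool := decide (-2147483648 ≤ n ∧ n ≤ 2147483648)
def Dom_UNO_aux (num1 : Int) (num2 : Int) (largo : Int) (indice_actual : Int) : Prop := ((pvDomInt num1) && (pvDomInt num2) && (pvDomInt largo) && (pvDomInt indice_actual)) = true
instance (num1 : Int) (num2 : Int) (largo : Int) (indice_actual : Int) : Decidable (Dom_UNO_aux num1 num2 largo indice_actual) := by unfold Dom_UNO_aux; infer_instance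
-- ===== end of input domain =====

-- B replaces A's non-tail recursion with one flat comprehension (flatMap) over
-- range(indice_actual, largo) crossed with a two-entry spec table, factoring digit
-- extraction, position selection and row construction into shared helpers; objective: alternative.

-- ===== PORT A =====
-- Note: the exponents largo - 1 - posicion_* are nonnegative whenever they can be negative-free;
-- '10 ^ (…).toNat' is exact here because the exponent is ≥ 0 on every reachable branch.
def UNO_aux (num1 : Int) (num2 : Int) (largo : Int) (indice_actual : Int) : List (List Int) :=
  if _h : indice_actual ≥ largo then []
  else
    let cantidad_pares := PySem.Int.floordiv (largo + 1) 2
    let cantidad_impares := PySem.Int.floordiv largo 2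
    let odd_max := largo - 2 + (PySem.Int.mod (largo - 1) 2)
    let even_max := largo - 2 + (1 - (PySem.Int.mod (largo - 1) 2))
    let posicion_primer :=
      if indice_actual < cantidad_pares then 2 * indice_actual
      else odd_max - 2 * (indice_actual - cantidad_pares)
    let posicion_segundo :=
      if indice_actual < cantidad_impares then 2 * indice_actual + 1
      else even_max - 2 * (indice_actual - cantidad_impares)
    let dig1_encontrado := PySem.Int.mod (PySem.Int.floordiv num1 (10 ^ (largo - 1 - posicion_primer).toNat)) 10
    let dig2_encontrado := PySem.Int.mod (PySem.Int.floordiv num2 (10 ^ (largo - 1 - posicion_segundo).toNat)) 10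
    let sucesor1 := dig1_encontrado + 1
    let antecesor1 := dig1_encontrado - 1
    let sucesor2 := dig2_encontrado + 1
    let antecesor2 := dig2_encontrado - 1
    let digito_primer : List Int := [1, 0, 1, sucesor1, dig1_encontrado, sucesor1 + dig1_encontrado - antecesor1, antecesor1, -1, 0, -1]
    let digito_segundo : List Int := [-2, 0, -2, sucesor2, dig2_encontrado, sucesor2 + dig2_encontrado - antecesor2, antecesor2, 2, 0, 2]
    [digito_primer, digito_segundo] ++ UNO_aux num1 num2 largo (indice_actual + 1)
termination_by (largo - indice_actual).toNat
decreasing_by omega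

-- ===== PORT B =====
-- helper row(t, d): the digit-transform row tagged by t
def pvRow (t : Int) (d : Int) : List Int := [t, 0, t, d + 1, d, d + 2, d - 1, -t, 0, -t]

-- helper pos(i, cnt, mx, off): position selector shared by both table entries
def pvPos (i : Int) (cnt : Int) (mx : Int) (off : Int) : Int :=
  if i < cnt then 2 * i + off else mx - 2 * (i - cnt)

-- helper dig(num, p): digit of num at position p (closure over largo in Source B)
def pvDig (largo : Int) (num : Int) (p : Int) : Int :=
  PySem.Int.mod (PySem.Int.floordiv num (10 ^ (largo - 1 - p).toNat)) 10

def UNO_aux_alt (num1 : Int) (num2 : Int) (largo : Int) (indice_actual : Int) : List (List Int) :=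
  let cp := PySem.Int.floordiv (largo + 1) 2
  let ci := PySem.Int.floordiv largo 2
  let r := PySem.Int.mod (largo - 1) 2
  (PySem.List.pyRange indice_actual largo 1).flatMap (fun i =>
    ([((1 : Int), num1, cp, largo - 2 + r, (0 : Int)),
      (-2, num2, ci, largo - 1 - r, 1)] : List (Int × Int × Int × Int × Int)).map
      (fun q => pvRow q.1 (pvDig largo q.2.1 (pvPos i q.2.2.1 q.2.2.2.1 q.2.2.2.2))))

-- ===== PRECONDITION & SPEC =====
def Spec_UNO_aux (num1 : Int) (num2 : Int) (largo : Int) (indice_actual : Int) (out : List (List Int)) : Prop := out = UNO_aux_alt num1 num2 largo indice_actual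
instance (num1 : Int) (num2 : Int) (largo : Int) (indice_actual : Int) (out : List (List Int)) : Decidable (Spec_UNO_aux num1 num2 largo indice_actual out) := by unfold Spec_UNO_aux; infer_instance

-- ===== CLAIM (what is proved, stated in full; the proofs are below) =====
def Claim_equal_UNO_aux : Prop := ∀ (num1 : Int) (num2 : Int) (largo : Int) (indice_actual : Int), Dom_UNO_aux num1 num2 largo indice_actual → Spec_UNO_aux num1 num2 largo indice_actual (UNO_aux num1 num2 largo indice_actual)

-- ===== LEMMAS AND PROOFS =====

-- The flatMap body at one index i equals A's two rows at that index.
theorem UNO_aux_step (num1 num2 largo i : Int) :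
    ([((1 : Int), num1, PySem.Int.floordiv (largo + 1) 2, largo - 2 + PySem.Int.mod (largo - 1) 2, (0 : Int)),
      (-2, num2, PySem.Int.floordiv largo 2, largo - 1 - PySem.Int.mod (largo - 1) 2, 1)] : List (Int × Int × Int × Int × Int)).map
      (fun q => pvRow q.1 (pvDig largo q.2.1 (pvPos i q.2.2.1 q.2.2.2.1 q.2.2.2.2)))
    =
    (let cantidad_pares := PySem.Int.floordiv (largo + 1) 2
     let cantidad_impares := PySem.Int.floordiv largo 2
     let odd_max := largo - 2 + (PySem.Int.mod (largo - 1) 2)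
     let even_max := largo - 2 + (1 - (PySem.Int.mod (largo - 1) 2))
     let p1 := if i < cantidad_pares then 2 * i else odd_max - 2 * (i - cantidad_pares)
     let p2 := if i < cantidad_impares then 2 * i + 1 else even_max - 2 * (i - cantidad_impares)
     let d1 := PySem.Int.mod (PySem.Int.floordiv num1 (10 ^ (largo - 1 - p1).toNat)) 10
     let d2 := PySem.Int.mod (PySem.Int.floordiv num2 (10 ^ (largo - 1 - p2).toNat)) 10
     [[1, 0, 1, d1 + 1, d1, (d1 + 1) + d1 - (d1 - 1), d1 - 1, -1, 0, -1],
      [-2, 0, -2, d2 + 1, d2, (d2 + 1) + d2 - (d2 - 1), d2 - 1, 2, 0, 2]]) := by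
  simp only [List.map, pvRow, pvPos, pvDig]
  have e1 : ∀ d : Int, (d + 1) + d - (d - 1) = d + 2 := by intro d; ring
  have e2 : largo - 2 + (1 - PySem.Int.mod (largo - 1) 2) = largo - 1 - PySem.Int.mod (largo - 1) 2 := by ring
  have e3 : ∀ i : Int, 2 * i + 0 = 2 * i := by intro i; ring
  simp only [e1, e2, e3]
  norm_num

-- B's flatMap over pyRange i largo equals A's recursion from i.
theorem UNO_aux_flatMap (num1 num2 largo : Int) :
    ∀ (i : Int),
      (PySem.List.pyRange i largo 1).flatMap (fun j =>
        ([((1 : Int), num1, PySem.Int.floordiv (largo + 1) 2, largo - 2 + PySem.Int.mod (largo - 1) 2, (0 : Int)),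
          (-2, num2, PySem.Int.floordiv largo 2, largo - 1 - PySem.Int.mod (largo - 1) 2, 1)] : List (Int × Int × Int × Int × Int)).map
          (fun q => pvRow q.1 (pvDig largo q.2.1 (pvPos j q.2.2.1 q.2.2.2.1 q.2.2.2.2))))
      = UNO_aux num1 num2 largo i := by
  intro i
  by_cases h : largo ≤ i
  · rw [PySem.List.pyRange_one_eq_nil h, UNO_aux]
    simp [h]
  · have hfuel : (largo - i).toNat ≠ 0 := by omega
    generalize hn : (largo - i).toNat = n at hfuel
    induction n generalizing i with
    | zero => exact absurd rfl hfuel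
    | succ n ih =>
      rw [PySem.List.pyRange_one_cons (by omega : i < largo)]
      rw [List.flatMap_cons, UNO_aux_step num1 num2 largo i]
      rw [UNO_aux]
      simp only [ge_iff_le, dif_neg (not_le.mpr (by omega : i < largo))]
      by_cases h2 : largo ≤ i + 1
      · rw [PySem.List.pyRange_one_eq_nil h2, UNO_aux]
        simp [h2]
      · have := ih (i + 1) h2 (by omega) (by omega)
        rw [this]
theorem UNO_aux_spec : Claim_equal_UNO_aux := by
  intro num1 num2 largo i _
  unfold Spec_UNO_aux UNO_aux_alt
  exact (UNO_aux_flatMap num1 num2 largo i).symm
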